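-- pv_equiv track=rewrite | github.com/AnDreV133/BSTU-labs | 2kurs2sem/OperRes/lab1/main.py | combination_with_tail
-- ===== SOURCE A (Python) =====
-- import itertools
--
-- def combination_with_tail(n, k):
--     # Формируем комбинации
--     combs = itertools.combinations(range(n), k)
--     # Приписываем остальную часть
--     res = []
--     for comb in combs:
--         buf = list(comb)
--         for i in range(n):
--             if not (i in buf):
--                 buf.append(i)
--
--         res.append(buf)
--
--     return res
-- ===== SOURCE B (Python) =====
-- def combination_with_tail(n, k):
--     # Recursive take/skip backtracking instead of itertools.combinations:
--     # each completed selection (in lexicographic order) is finished with the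
--     # remaining elements of range(n) in increasing order; branches that can no
--     # longer reach k picks are pruned.
--     def go(chosen, rest):
--         if len(chosen) + len(rest) < k:
--             return []
--         if len(chosen) == k:
--             return [chosen + [i for i in range(n) if i not in chosen]]
--         if not rest:
--             return []
--         return go(chosen + [rest[0]], rest[1:]) + go(chosen, rest[1:])
--     return go([], list(range(n)))
-- ===== Notes on version B (the rewrite author's own statement) =====
-- stated objective: alternative
-- what changed: Replaces the itertools.combinations library call plus a per-row membership-scan fold with a self-contained pruned take/skip recursion over the candidate list that emits each finished row (selection plus complement) directly.
import Mathlib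
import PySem

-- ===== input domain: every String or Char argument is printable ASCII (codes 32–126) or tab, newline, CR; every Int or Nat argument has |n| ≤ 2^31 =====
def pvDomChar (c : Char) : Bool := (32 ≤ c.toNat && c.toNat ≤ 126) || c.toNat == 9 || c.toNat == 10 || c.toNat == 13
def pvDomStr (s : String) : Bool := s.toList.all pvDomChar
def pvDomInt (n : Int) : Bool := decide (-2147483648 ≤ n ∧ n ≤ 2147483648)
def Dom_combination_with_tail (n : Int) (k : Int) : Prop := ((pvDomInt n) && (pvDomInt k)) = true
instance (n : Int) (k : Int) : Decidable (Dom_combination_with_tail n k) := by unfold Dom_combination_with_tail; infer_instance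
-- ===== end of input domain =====

-- B drops the itertools.combinations call for a take/skip recursion building each row directly; alternative decomposition, same cost.
-- ===== PORT A =====
-- hand port of itertools.combinations(pool, k) (no PySem primitive): exact same
-- lexicographic output order (rows containing the first element first).
def pyCombinations : Nat → List Int → List (List Int)
  | 0, _ => [[]]
  | _ + 1, [] => []
  | j + 1, x :: xs => (pyCombinations j xs).map (fun c => x :: c) ++ pyCombinations (j + 1) xs

def combination_with_tail (n : Int) (k : Int) : List (List Int) :=
  -- for comb in combs: buf = list(comb); for i in range(n): if not (i in buf): buf.append(i); res.append(buf)
  (pyCombinations k.toNat (PySem.List.pyRange 0 n 1)).foldl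
    (fun res comb =>
      res ++ [(PySem.List.pyRange 0 n 1).foldl
                (fun buf i => if !(buf.contains i) then buf ++ [i] else buf) comb])
    []

-- ===== PORT B =====
def altGo (n : Int) (k : Int) (chosen : List Int) (rest : List Int) : List (List Int) :=
  if ((chosen.length : Int) + rest.length < k) then []
  else if ((chosen.length : Int) = k) then
    [chosen ++ (PySem.List.pyRange 0 n 1).filter (fun i => !(chosen.contains i))]
  else
    match rest with
    | [] => []
    | x :: xs => altGo n k (chosen ++ [x]) xs ++ altGo n k chosen xs
termination_by rest.length

def combination_with_tail_alt (n : Int) (k : Int) : List (List Int) :=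
  altGo n k [] (PySem.List.pyRange 0 n 1)

-- ===== PRECONDITION & SPEC =====
-- Python A raises ValueError (from itertools.combinations) when k < 0; excluded.
def Pre_combination_with_tail (n : Int) (k : Int) : Prop := 0 ≤ k
instance (n : Int) (k : Int) : Decidable (Pre_combination_with_tail n k) := by unfold Pre_combination_with_tail; infer_instance
def pvWitness_combination_with_tail : Int × Int := (4, 2)

def Spec_combination_with_tail (n : Int) (k : Int) (out : List (List Int)) : Prop := out = combination_with_tail_alt n k
instance (n : Int) (k : Int) (out : List (List Int)) : Decidable (Spec_combination_with_tail n k out) := by unfold Spec_combination_with_tail; infer_instance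

-- ===== CLAIM (what is proved, stated in full; the proofs are below) =====
def Claim_equal_combination_with_tail : Prop := ∀ (n : Int) (k : Int), Dom_combination_with_tail n k → Pre_combination_with_tail n k → Spec_combination_with_tail n k (combination_with_tail n k)

-- ===== LEMMAS AND PROOFS =====

-- A's inner membership-scan fold just appends the not-yet-present elements, provided the scanned list has no duplicates.
theorem foldl_append_not_mem (xs : List Int) (h : xs.Nodup) (comb : List Int) :
    xs.foldl (fun buf i => if !(buf.contains i) then buf ++ [i] else buf) comb
      = comb ++ xs.filter (fun i => !(comb.contains i)) := by
  induction xs generalizing comb with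
  | nil => simp
  | cons x xs ih =>
    simp only [List.foldl_cons, List.filter_cons, List.contains_eq_mem] at *
    have hx : x ∉ xs := (List.nodup_cons.mp h).1
    have hxs : xs.Nodup := (List.nodup_cons.mp h).2
    by_cases hc : x ∈ comb
    · simp only [hc, decide_true, Bool.not_true, Bool.false_eq_true, if_false]
      exact ih hxs comb
    · simp only [hc, decide_false, Bool.not_false, if_true]
      rw [ih hxs (comb ++ [x])]
      have hf : xs.filter (fun i => !decide (i ∈ comb) && !decide (i = x))
          = xs.filter (fun i => !decide (i ∈ comb)) := by
        apply List.filter_congr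
        intro i hi
        have : i ≠ x := fun e => hx (e ▸ hi)
        simp [this]
      simp [hf]

theorem foldl_append_singleton (g : List Int → List Int) (L : List (List Int)) (acc : List (List Int)) :
    L.foldl (fun res c => res ++ [g c]) acc = acc ++ L.map g := by
  induction L generalizing acc with
  | nil => simp
  | cons c L ih => simp [ih]

theorem pyCombinations_eq_nil (xs : List Int) : ∀ j : Nat, xs.length < j → pyCombinations j xs = [] := by
  induction xs with
  | nil => intro j hj; obtain ⟨m, rfl⟩ := Nat.exists_eq_succ_of_ne_zero (by omega : j ≠ 0); rfl
  | cons x xs ih =>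
    intro j hj
    obtain ⟨m, rfl⟩ := Nat.exists_eq_succ_of_ne_zero (by simp at hj; omega : j ≠ 0)
    simp only [pyCombinations]
    rw [ih m (by simp at hj; omega), ih (m + 1) (by simp at hj; omega)]
    simp

-- core invariant: the take/skip recursion enumerates exactly the k-|chosen| combinations of rest, each finished with the complement
theorem altGo_eq (n : Int) (K : Nat) (rest : List Int) :
    ∀ chosen : List Int, chosen.length ≤ K →
      altGo n (K : Int) chosen rest
        = (pyCombinations (K - chosen.length) rest).map
            (fun c => (chosen ++ c) ++ (PySem.List.pyRange 0 n 1).filter (fun i => !((chosen ++ c).contains i))) := by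
  induction rest with
  | nil =>
    intro chosen hle
    rw [altGo]
    by_cases hp : (chosen.length : Int) + ([] : List Int).length < (K : Int)
    · have : K - chosen.length ≠ 0 := by simp at hp; omega
      obtain ⟨m, hm⟩ := Nat.exists_eq_succ_of_ne_zero this
      simp [hm, pyCombinations]
      intro h
      simp at hp
      omega
    · by_cases hk : (chosen.length : Int) = (K : Int)
      · have hK : chosen.length = K := by exact_mod_cast hk
        simp [hK, pyCombinations]
      · have : K - chosen.length ≠ 0 := by
          have : chosen.length ≠ K := fun e => hk (by exact_mod_cast e); omega
        obtain ⟨m, hm⟩ := Nat.exists_eq_succ_of_ne_zero this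
        simp [hk, hm, pyCombinations]
  | cons x xs ih =>
    intro chosen hle
    rw [altGo]
    by_cases hp : (chosen.length : Int) + ((x :: xs) : List Int).length < (K : Int)
    · have hnil : pyCombinations (K - chosen.length) (x :: xs) = [] := by
        apply pyCombinations_eq_nil; simp at hp ⊢; omega
      simp only [hnil, List.map_nil]
      rw [if_pos hp]
    · simp only [hp, if_false]
      by_cases hk : (chosen.length : Int) = (K : Int)
      · have hK : chosen.length = K := by exact_mod_cast hk
        simp [hK, pyCombinations]
      · have hK : chosen.length ≠ K := fun e => hk (by exact_mod_cast e)
        have hlt : chosen.length < K := by omega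
        have : K - chosen.length ≠ 0 := by omega
        obtain ⟨m, hm⟩ := Nat.exists_eq_succ_of_ne_zero this
        simp only [hk, if_false]
        rw [ih (chosen ++ [x]) (by simp; omega), ih chosen hle]
        have h1 : K - (chosen ++ [x]).length = m := by simp; omega
        rw [h1, hm]
        simp only [pyCombinations, List.map_append, List.map_map]
        congr 1
        apply List.map_congr_left
        intro c _
        simp

theorem combination_with_tail_eq (n : Int) (k : Int) (hk : 0 ≤ k) :
    combination_with_tail n k = combination_with_tail_alt n k := by
  obtain ⟨K, rfl⟩ := Int.eq_ofNat_of_zero_le hk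
  unfold combination_with_tail combination_with_tail_alt
  rw [foldl_append_singleton, altGo_eq n K _ [] (by simp)]
  simp only [Int.toNat_natCast, List.length_nil, Nat.sub_zero, List.nil_append]
  apply List.map_congr_left
  intro c _
  exact foldl_append_not_mem _ (PySem.List.nodup_pyRange_one 0 n) c

-- ===== VERDICT (by name: the statement is the Claim_ definition above) =====
theorem combination_with_tail_spec : Claim_equal_combination_with_tail := by
  intro n k _ hk
  exact combination_with_tail_eq n k hk
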